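-- pv_equiv track=rewrite | github.com/raeez/chiral-bar-cobar | compute/lib/bar_cohomology_w4_explicit_engine.py | w4_vacuum_dims
-- ===== SOURCE A (Python) =====
-- from typing import Any, Dict, List, Optional, Tuple
--
-- def w4_vacuum_dims(max_weight: int) -> Dict[int, int]:
--     """Dimensions of the W_4 vacuum module (including vacuum) by weight.
--
--     Character:
--       chi_0(q) = prod_{n>=2} 1/(1-q^n) * prod_{m>=3} 1/(1-q^m) * prod_{p>=4} 1/(1-q^p)
--
--     This is the product of three partition-function factors, one for each
--     generator family. The L-modes start at n=2, W3-modes at m=3, W4-modes at p=4.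
--
--     Returns {h: dim} with dim[0] = 1 (vacuum).
--     """
--     # Factor 1: partitions with parts >= 2
--     c_L = [0] * (max_weight + 1)
--     c_L[0] = 1
--     for n in range(2, max_weight + 1):
--         for k in range(n, max_weight + 1):
--             c_L[k] += c_L[k - n]
--
--     # Factor 2: partitions with parts >= 3
--     c_W3 = [0] * (max_weight + 1)
--     c_W3[0] = 1
--     for m in range(3, max_weight + 1):
--         for k in range(m, max_weight + 1):
--             c_W3[k] += c_W3[k - m]
--
--     # Factor 3: partitions with parts >= 4
--     c_W4 = [0] * (max_weight + 1)
--     c_W4[0] = 1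
--     for p in range(4, max_weight + 1):
--         for k in range(p, max_weight + 1):
--             c_W4[k] += c_W4[k - p]
--
--     # Convolve all three
--     product = [0] * (max_weight + 1)
--     for i in range(max_weight + 1):
--         for j in range(max_weight + 1 - i):
--             product[i + j] += c_L[i] * c_W3[j]
--
--     final = [0] * (max_weight + 1)
--     for i in range(max_weight + 1):
--         for j in range(max_weight + 1 - i):
--             final[i + j] += product[i] * c_W4[j]
--
--     return {h: final[h] for h in range(max_weight + 1)}
-- ===== SOURCE B (Python) =====
-- def w4_vacuum_dims(max_weight: int):
--     """Dimensions of the W_4 vacuum module by weight, via a single knapsack DP.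
--
--     chi_0 = prod_{n>=2} 1/(1-q^n)^{c_n} with c_n = 1 + (n>=3) + (n>=4), so one
--     accumulating array suffices: no separate factor tables, no convolutions.
--     """
--     dp = [1] + [0] * max_weight
--     for n in range(2, max_weight + 1):
--         for _ in range(1 + (n >= 3) + (n >= 4)):
--             for k in range(n, max_weight + 1):
--                 dp[k] += dp[k - n]
--     return {h: dp[h] for h in range(max_weight + 1)}
-- ===== Notes on version B (the rewrite author's own statement) =====
-- stated objective: faster
-- what changed: Replaces A's three separate partition-DP tables plus two O(n^2) convolution passes by a single accumulating knapsack array that multiplies in each Euler factor 1/(1-q^n)^{c_n} (c_n = 1 + [n>=3] + [n>=4]) in place, with no factor tables and no convolutions.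
-- crash fix: For max_weight < 0, A raises IndexError (assigning c_L[0] on an empty list) while B returns the empty dict {}. — e.g. on w4_vacuum_dims(-1): A raises IndexError, B returns []
import Mathlib
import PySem

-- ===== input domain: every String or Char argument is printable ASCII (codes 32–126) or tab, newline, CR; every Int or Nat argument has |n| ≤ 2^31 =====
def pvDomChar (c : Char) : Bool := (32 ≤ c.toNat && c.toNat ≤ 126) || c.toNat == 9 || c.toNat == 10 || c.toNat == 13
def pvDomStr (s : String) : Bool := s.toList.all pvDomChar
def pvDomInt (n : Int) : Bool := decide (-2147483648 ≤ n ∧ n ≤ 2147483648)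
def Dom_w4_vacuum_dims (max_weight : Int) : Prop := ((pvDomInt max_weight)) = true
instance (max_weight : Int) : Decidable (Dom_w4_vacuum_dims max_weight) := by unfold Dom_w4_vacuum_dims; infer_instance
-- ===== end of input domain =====

-- B replaces A's three partition-DP tables and two convolution passes by one accumulating
-- knapsack array (one Euler factor per generator mode); equivalence is proved for max_weight ≥ 0.

-- ===== PORT A =====
-- `for k in range(n, N + 1): c[k] += c[k - n]`  (the loop body all five Python DP loops share)
def pvInner (N n : Int) (c : List Int) : List Int :=
  (PySem.List.pyRange n (N + 1) 1).foldl
    (fun c k => PySem.List.pySetD c k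
      (PySem.List.pyGetD c k 0 + PySem.List.pyGetD c (k - n) 0)) c

-- A's factor tables: `c = [0]*(N+1); c[0] = 1; for n in range(s, N+1): <inner loop>`
def pvPartsDP (N s : Int) : List Int :=
  (PySem.List.pyRange s (N + 1) 1).foldl (fun c n => pvInner N n c)
    (PySem.List.pySetD (List.replicate (N + 1).toNat 0) 0 1)

-- A's convolution: `out = [0]*(N+1); for i in range(N+1): for j in range(N+1-i): out[i+j] += p[i]*q[j]`
def pvConvLoop (N : Int) (p q : List Int) : List Int :=
  (PySem.List.pyRange 0 (N + 1) 1).foldl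
    (fun pr i =>
      (PySem.List.pyRange 0 (N + 1 - i) 1).foldl
        (fun pr j => PySem.List.pySetD pr (i + j)
          (PySem.List.pyGetD pr (i + j) 0
            + PySem.List.pyGetD p i 0 * PySem.List.pyGetD q j 0)) pr)
    (List.replicate (N + 1).toNat 0)

def w4_vacuum_dims (max_weight : Int) : List (Int × Int) :=
  let c_L := pvPartsDP max_weight 2
  let c_W3 := pvPartsDP max_weight 3
  let c_W4 := pvPartsDP max_weight 4
  let product := pvConvLoop max_weight c_L c_W3
  let final := pvConvLoop max_weight product c_W4
  (PySem.List.pyRange 0 (max_weight + 1) 1).map (fun h => (h, PySem.List.pyGetD final h 0))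

-- ===== PORT B =====
-- dp = [1] + [0]*mw; for n in range(2, mw+1): for _ in range(1+(n>=3)+(n>=4)): <inner loop>
def pvKnapsack (N : Int) : List Int :=
  (PySem.List.pyRange 2 (N + 1) 1).foldl
    (fun dp n =>
      (PySem.List.pyRange 0 (1 + (if 3 ≤ n then 1 else 0) + (if 4 ≤ n then 1 else 0)) 1).foldl
        (fun dp _ => pvInner N n dp) dp)
    (1 :: List.replicate N.toNat 0)

def w4_vacuum_dims_alt (max_weight : Int) : List (Int × Int) :=
  let dp := pvKnapsack max_weight
  (PySem.List.pyRange 0 (max_weight + 1) 1).map (fun h => (h, PySem.List.pyGetD dp h 0))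

-- ===== PRECONDITION & SPEC =====
-- Pre_ excludes max_weight < 0, where Python A raises IndexError (c_L[0] = 1 on an empty list).
def Pre_w4_vacuum_dims (max_weight : Int) : Prop := 0 ≤ max_weight
instance (max_weight : Int) : Decidable (Pre_w4_vacuum_dims max_weight) := by
  unfold Pre_w4_vacuum_dims; infer_instance
def pvWitness_w4_vacuum_dims : Int := 5

-- For max_weight < 0, A raises IndexError while B returns the empty dict {}.
def Raises_w4_vacuum_dims (max_weight : Int) : Prop := max_weight < 0
instance (max_weight : Int) : Decidable (Raises_w4_vacuum_dims max_weight) := by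
  unfold Raises_w4_vacuum_dims; infer_instance
def pvRaiseWitness_w4_vacuum_dims : Int := -1
def pvRaiseWitnessOut_w4_vacuum_dims : List (Int × Int) := []

def Spec_w4_vacuum_dims (max_weight : Int) (out : List (Int × Int)) : Prop :=
  out = w4_vacuum_dims_alt max_weight
instance (max_weight : Int) (out : List (Int × Int)) : Decidable (Spec_w4_vacuum_dims max_weight out) := by
  unfold Spec_w4_vacuum_dims; infer_instance

-- ===== CLAIM (what is proved, stated in full; the proofs are below) =====
def Claim_equal_w4_vacuum_dims : Prop := ∀ (max_weight : Int), Dom_w4_vacuum_dims max_weight → Pre_w4_vacuum_dims max_weight → Spec_w4_vacuum_dims max_weight (w4_vacuum_dims max_weight)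
def Claim_raises_w4_vacuum_dims : Prop := (∀ (max_weight : Int), Dom_w4_vacuum_dims max_weight → Raises_w4_vacuum_dims max_weight → ¬ Pre_w4_vacuum_dims max_weight) ∧ (Dom_w4_vacuum_dims (pvRaiseWitness_w4_vacuum_dims) ∧ Raises_w4_vacuum_dims (pvRaiseWitness_w4_vacuum_dims) ∧ w4_vacuum_dims_alt (pvRaiseWitness_w4_vacuum_dims) = pvRaiseWitnessOut_w4_vacuum_dims)

-- ===== LEMMAS AND PROOFS =====
-- Both programs compute coefficients of products of the geometric series 1/(1-q^n);
-- we interpret array states as power series over ℤ and track them through the loops.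

-- the power series 1/(1-X^n)
noncomputable def pvG (n : Nat) : PowerSeries ℤ := PowerSeries.mk fun m => if n ∣ m then 1 else 0

-- coefficient of a power series at an Int index
noncomputable def pvC (φ : PowerSeries ℤ) (k : Int) : Int :=
  if 0 ≤ k then PowerSeries.coeff k.toNat φ else 0

-- "array a has the right length and holds φ's coefficients on [0, N]"
def pvAgree (N : Int) (a : List Int) (φ : PowerSeries ℤ) : Prop :=
  a.length = (N + 1).toNat ∧
    ∀ k : Int, 0 ≤ k → k ≤ N → PySem.List.pyGetD a k 0 = pvC φ k

theorem pvSet_getD (a : List Int) (k v : Int) (hk : 0 ≤ k)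
    (i : Int) (hi : 0 ≤ i) (hilen : i.toNat < a.length) :
    PySem.List.pyGetD (PySem.List.pySetD a k v) i 0
      = if i = k then v else PySem.List.pyGetD a i 0 := by
  rw [PySem.List.pySetD_of_nonneg a v hk,
    PySem.List.pyGetD_eq_getElem _ 0 hi (by simp only [List.length_set]; omega),
    List.getElem_set, PySem.List.pyGetD_eq_getElem a 0 hi (by omega)]
  exact if_congr (by omega) rfl rfl

theorem pvFoldSet_length {α : Type} (l : List α) (g w : List Int → α → Int) :
    ∀ c : List Int,
      (l.foldl (fun c x => PySem.List.pySetD c (g c x) (w c x)) c).length = c.length := by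
  induction l with
  | nil => intro c; rfl
  | cons x l ih => intro c; rw [List.foldl_cons, ih]; simp [PySem.List.length_pySetD]

theorem pvInner_length (N n : Int) (c : List Int) : (pvInner N n c).length = c.length := by
  unfold pvInner
  exact pvFoldSet_length _ (fun _ k => k)
    (fun c k => PySem.List.pyGetD c k 0 + PySem.List.pyGetD c (k - n) 0) c

theorem pvG_one_add (n : Nat) (hn : 1 ≤ n) : pvG n = 1 + PowerSeries.X ^ n * pvG n := by
  ext m
  simp only [pvG, map_add, PowerSeries.coeff_mk, PowerSeries.coeff_one,
    PowerSeries.coeff_X_pow_mul', PowerSeries.coeff_mk]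
  rcases Nat.eq_zero_or_pos m with hm | hm
  · subst hm
    rw [if_pos (dvd_zero n), if_pos rfl, if_neg (by omega)]
    norm_num
  · rw [if_neg (by omega : ¬ m = 0), zero_add]
    by_cases hnm : n ≤ m
    · rw [if_pos hnm]
      have hiff : n ∣ m ↔ n ∣ m - n := by
        constructor
        · intro hd; exact Nat.dvd_sub hd dvd_rfl
        · intro hd
          have h2 := dvd_add hd (dvd_refl n)
          rwa [Nat.sub_add_cancel hnm] at h2
      exact if_congr hiff rfl rfl
    · rw [if_neg hnm, if_neg (fun hd => hnm (Nat.le_of_dvd hm hd))]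

theorem pvC_mulG (φ : PowerSeries ℤ) (n : Int) (hn : 1 ≤ n) :
    ∀ k : Int, 0 ≤ k →
      pvC (φ * pvG n.toNat) k
        = pvC φ k + (if n ≤ k then pvC (φ * pvG n.toNat) (k - n) else 0) := by
  intro k hk
  conv_lhs => rw [pvG_one_add n.toNat (by omega)]
  rw [mul_add, mul_one,
    show φ * (PowerSeries.X ^ n.toNat * pvG n.toNat)
        = PowerSeries.X ^ n.toNat * (φ * pvG n.toNat) from by ring]
  simp only [pvC, if_pos hk, map_add, PowerSeries.coeff_X_pow_mul']
  by_cases hnk : n ≤ k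
  · rw [if_pos hnk, if_pos (show n.toNat ≤ k.toNat by omega),
      if_pos (show (0 : Int) ≤ k - n by omega),
      show k.toNat - n.toNat = (k - n).toNat from by omega]
  · rw [if_neg hnk, if_neg (show ¬ n.toNat ≤ k.toNat by omega)]

theorem pvInner_inv (n : Int) (hn : 1 ≤ n) (ψ φ : PowerSeries ℤ)
    (hψ : ∀ k : Int, 0 ≤ k → pvC ψ k = pvC φ k + (if n ≤ k then pvC ψ (k - n) else 0))
    (N : Int) :
    ∀ (t : Nat) (m : Int) (a : List Int), (N + 1 - m).toNat = t → n ≤ m →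
      a.length = (N + 1).toNat →
      (∀ i : Int, 0 ≤ i → i < m → i ≤ N → PySem.List.pyGetD a i 0 = pvC ψ i) →
      (∀ i : Int, m ≤ i → i ≤ N → PySem.List.pyGetD a i 0 = pvC φ i) →
      ∀ k : Int, 0 ≤ k → k ≤ N →
        PySem.List.pyGetD
          ((PySem.List.pyRange m (N + 1) 1).foldl
            (fun c k => PySem.List.pySetD c k
              (PySem.List.pyGetD c k 0 + PySem.List.pyGetD c (k - n) 0)) a) k 0
          = pvC ψ k := by
  intro t
  induction t with
  | zero =>
    intro m a ht hm hlen h1 h2 k hk0 hkN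
    rw [PySem.List.pyRange_one_eq_nil (by omega), List.foldl_nil]
    exact h1 k hk0 (by omega) hkN
  | succ t ih =>
    intro m a ht hm hlen h1 h2 k hk0 hkN
    have hm0 : (0 : Int) ≤ m := by omega
    rw [PySem.List.pyRange_one_cons (by omega : m < N + 1), List.foldl_cons]
    refine ih (m + 1) _ (by omega) (by omega)
      (by rw [PySem.List.length_pySetD]; exact hlen) ?_ ?_ k hk0 hkN
    · intro i hi0 him hiN
      rw [pvSet_getD a m _ hm0 i hi0 (by omega)]
      by_cases hie : i = m
      · rw [if_pos hie, hie, h2 m le_rfl (by omega),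
          h1 (m - n) (by omega) (by omega) (by omega), hψ m (by omega),
          if_pos (by omega : n ≤ m)]
      · rw [if_neg hie]
        exact h1 i hi0 (by omega) hiN
    · intro i him hiN
      rw [pvSet_getD a m _ hm0 i (by omega) (by omega), if_neg (by omega)]
      exact h2 i (by omega) hiN

theorem pvInner_agree (N n : Int) (hn : 1 ≤ n) (a : List Int) (φ : PowerSeries ℤ)
    (ha : pvAgree N a φ) : pvAgree N (pvInner N n a) (φ * pvG n.toNat) := by
  have hψ := pvC_mulG φ n hn
  constructor
  · rw [pvInner_length]; exact ha.1
  intro k hk0 hkN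
  unfold pvInner
  refine pvInner_inv n hn (φ * pvG n.toNat) φ hψ N (N + 1 - n).toNat n a rfl le_rfl ha.1
    ?_ ?_ k hk0 hkN
  · intro i hi0 hin hiN
    rw [ha.2 i hi0 hiN, hψ i hi0, if_neg (by omega), add_zero]
  · intro i hni hiN
    exact ha.2 i (by omega) hiN

theorem pvReplicate_getD (L : Nat) (k : Int) (hk0 : 0 ≤ k) (hk : k.toNat < L) :
    PySem.List.pyGetD (List.replicate L (0 : Int)) k 0 = 0 := by
  rw [PySem.List.pyGetD_eq_getElem _ 0 hk0 (by simp; omega), List.getElem_replicate]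

theorem pvAgree_init_A (N : Int) (h0 : 0 ≤ N) :
    pvAgree N (PySem.List.pySetD (List.replicate (N + 1).toNat 0) 0 1) 1 := by
  constructor
  · rw [PySem.List.length_pySetD, List.length_replicate]
  intro k hk0 hkN
  rw [pvSet_getD _ 0 1 le_rfl k hk0 (by simp; omega)]
  simp only [pvC, if_pos hk0, PowerSeries.coeff_one]
  by_cases hk : k = 0
  · rw [if_pos hk, if_pos (by omega)]
  · rw [if_neg hk, if_neg (by omega),
      pvReplicate_getD _ k hk0 (by omega)]

theorem pvAgree_init_B (N : Int) (h0 : 0 ≤ N) :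
    pvAgree N (1 :: List.replicate N.toNat 0) 1 := by
  constructor
  · simp; omega
  intro k hk0 hkN
  rw [PySem.List.pyGetD_eq_getElem _ 0 hk0 (by simp; omega)]
  simp only [pvC, if_pos hk0, PowerSeries.coeff_one]
  by_cases hk : k = 0
  · subst hk
    simp
  · obtain ⟨m, hm⟩ : ∃ m, k.toNat = m + 1 := ⟨k.toNat - 1, by omega⟩
    rw [if_neg (by omega)]
    simp only [hm, List.getElem_cons_succ]
    rw [List.getElem_replicate]

theorem pvFold_agree (N : Int) :
    ∀ (l : List Int) (a : List Int) (φ : PowerSeries ℤ), (∀ n ∈ l, 1 ≤ n) → pvAgree N a φ →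
      pvAgree N (l.foldl (fun c n => pvInner N n c) a)
        (φ * (l.map fun n => pvG n.toNat).prod) := by
  intro l
  induction l with
  | nil => intro a φ _ ha; simpa using ha
  | cons n l ih =>
    intro a φ hl ha
    simp only [List.foldl_cons, List.map_cons, List.prod_cons]
    rw [← mul_assoc]
    exact ih (pvInner N n a) (φ * pvG n.toNat)
      (fun x hx => hl x (List.mem_cons_of_mem _ hx))
      (pvInner_agree N n (hl n (by simp)) a φ ha)

theorem pvPartsDP_agree (N s : Int) (hs : 1 ≤ s) (h0 : 0 ≤ N) :
    pvAgree N (pvPartsDP N s) ((PySem.List.pyRange s (N + 1) 1).map fun n => pvG n.toNat).prod := by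
  unfold pvPartsDP
  have h := pvFold_agree N (PySem.List.pyRange s (N + 1) 1)
    (PySem.List.pySetD (List.replicate (N + 1).toNat 0) 0 1) 1
    (fun n hn => by rw [PySem.List.mem_pyRange_one] at hn; omega) (pvAgree_init_A N h0)
  simpa using h

theorem pvConvInner (N : Int) (p q : List Int) (i : Int) (hi : 0 ≤ i) (M : Int)
    (hiM : i + M ≤ N + 1) :
    ∀ (t : Nat) (j0 : Int) (pr : List Int), (M - j0).toNat = t → 0 ≤ j0 →
      pr.length = (N + 1).toNat →
      ∀ k : Int, 0 ≤ k → k ≤ N →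
        PySem.List.pyGetD
          ((PySem.List.pyRange j0 M 1).foldl
            (fun pr j => PySem.List.pySetD pr (i + j)
              (PySem.List.pyGetD pr (i + j) 0
                + PySem.List.pyGetD p i 0 * PySem.List.pyGetD q j 0)) pr) k 0
          = PySem.List.pyGetD pr k 0
            + (if i + j0 ≤ k ∧ k < i + M then PySem.List.pyGetD p i 0 * PySem.List.pyGetD q (k - i) 0 else 0) := by
  intro t
  induction t with
  | zero =>
    intro j0 pr ht hj0 hlen k hk0 hkN
    rw [PySem.List.pyRange_one_eq_nil (by omega), List.foldl_nil, if_neg (by omega), add_zero]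
  | succ t ih =>
    intro j0 pr ht hj0 hlen k hk0 hkN
    have hidx : (0 : Int) ≤ i + j0 := by omega
    rw [PySem.List.pyRange_one_cons (by omega : j0 < M), List.foldl_cons,
      ih (j0 + 1) _ (by omega) (by omega) (by rw [PySem.List.length_pySetD]; exact hlen) k hk0 hkN,
      pvSet_getD pr (i + j0) _ hidx k hk0 (by omega)]
    by_cases he : k = i + j0
    · rw [if_pos he, if_neg (by omega), add_zero, if_pos ⟨by omega, by omega⟩, he,
        show i + j0 - i = j0 from by ring]
    · rw [if_neg he]
      congr 1
      exact if_congr (by omega) rfl rfl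

theorem pvConvOuter (N : Int) (p q : List Int) :
    ∀ (t : Nat) (i0 : Int) (pr : List Int), (N + 1 - i0).toNat = t → 0 ≤ i0 →
      pr.length = (N + 1).toNat →
      ∀ k : Int, 0 ≤ k → k ≤ N →
        PySem.List.pyGetD
          ((PySem.List.pyRange i0 (N + 1) 1).foldl
            (fun pr i =>
              (PySem.List.pyRange 0 (N + 1 - i) 1).foldl
                (fun pr j => PySem.List.pySetD pr (i + j)
                  (PySem.List.pyGetD pr (i + j) 0
                    + PySem.List.pyGetD p i 0 * PySem.List.pyGetD q j 0)) pr) pr) k 0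
          = PySem.List.pyGetD pr k 0
            + ((PySem.List.pyRange i0 (N + 1) 1).map
                (fun i => if i ≤ k then PySem.List.pyGetD p i 0 * PySem.List.pyGetD q (k - i) 0 else 0)).sum := by
  intro t
  induction t with
  | zero =>
    intro i0 pr ht hi0 hlen k hk0 hkN
    rw [PySem.List.pyRange_one_eq_nil (by omega)]
    simp
  | succ t ih =>
    intro i0 pr ht hi0 hlen k hk0 hkN
    have hlen2 : ((PySem.List.pyRange 0 (N + 1 - i0) 1).foldl
        (fun pr j => PySem.List.pySetD pr (i0 + j)
          (PySem.List.pyGetD pr (i0 + j) 0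
            + PySem.List.pyGetD p i0 0 * PySem.List.pyGetD q j 0)) pr).length
        = (N + 1).toNat := by
      rw [pvFoldSet_length _ (fun _ j => i0 + j)
        (fun pr j => PySem.List.pyGetD pr (i0 + j) 0
          + PySem.List.pyGetD p i0 0 * PySem.List.pyGetD q j 0) pr]
      exact hlen
    rw [PySem.List.pyRange_one_cons (by omega : i0 < N + 1), List.foldl_cons,
      ih (i0 + 1) _ (by omega) (by omega) hlen2 k hk0 hkN, List.map_cons, List.sum_cons,
      pvConvInner N p q i0 (by omega) (N + 1 - i0) (by omega)
        ((N + 1 - i0) - 0).toNat 0 pr rfl le_rfl hlen k hk0 hkN]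
    have e1 : (if i0 + 0 ≤ k ∧ k < i0 + (N + 1 - i0)
          then PySem.List.pyGetD p i0 0 * PySem.List.pyGetD q (k - i0) 0 else 0)
        = (if i0 ≤ k then PySem.List.pyGetD p i0 0 * PySem.List.pyGetD q (k - i0) 0 else 0) :=
      if_congr (by omega) rfl rfl
    rw [e1, add_assoc]

theorem pvListSumRange (n : Nat) (f : Nat → Int) :
    ((List.range n).map f).sum = ∑ i ∈ Finset.range n, f i := by
  induction n with
  | zero => simp
  | succ n ih =>
    rw [List.range_succ, List.map_append, List.sum_append, Finset.sum_range_succ, ih]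
    simp

theorem pvConvLoop_agree (N : Int) (p q : List Int) (φ ψ : PowerSeries ℤ)
    (hp : pvAgree N p φ) (hq : pvAgree N q ψ) : pvAgree N (pvConvLoop N p q) (φ * ψ) := by
  constructor
  · unfold pvConvLoop
    have hstep : ∀ (l : List Int) (pr : List Int),
        (l.foldl (fun pr i =>
          (PySem.List.pyRange 0 (N + 1 - i) 1).foldl
            (fun pr j => PySem.List.pySetD pr (i + j)
              (PySem.List.pyGetD pr (i + j) 0
                + PySem.List.pyGetD p i 0 * PySem.List.pyGetD q j 0)) pr) pr).length = pr.length := by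
      intro l
      induction l with
      | nil => intro pr; rfl
      | cons x l ih =>
        intro pr
        rw [List.foldl_cons, ih,
          pvFoldSet_length _ (fun _ j => x + j)
            (fun pr j => PySem.List.pyGetD pr (x + j) 0
              + PySem.List.pyGetD p x 0 * PySem.List.pyGetD q j 0) pr]
    rw [hstep]
    simp
  intro k hk0 hkN
  unfold pvConvLoop
  rw [pvConvOuter N p q ((N + 1) - 0).toNat 0 _ rfl le_rfl (by simp) k hk0 hkN,
    pvReplicate_getD _ k hk0 (by omega), zero_add,
    PySem.List.pyRange_one_append 0 (k + 1) (N + 1) (by omega) (by omega),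
    List.map_append, List.sum_append]
  have h2 : ((PySem.List.pyRange (k + 1) (N + 1) 1).map
      (fun i => if i ≤ k then PySem.List.pyGetD p i 0 * PySem.List.pyGetD q (k - i) 0 else 0)).sum = 0 := by
    apply List.sum_eq_zero
    intro x hx
    rcases List.mem_map.mp hx with ⟨i, hi, rfl⟩
    rw [PySem.List.mem_pyRange_one] at hi
    rw [if_neg (by omega)]
  rw [h2, add_zero]
  have h1 : (PySem.List.pyRange 0 (k + 1) 1).map
        (fun i => if i ≤ k then PySem.List.pyGetD p i 0 * PySem.List.pyGetD q (k - i) 0 else 0)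
      = (PySem.List.pyRange 0 (k + 1) 1).map
        (fun i => PySem.List.pyGetD p i 0 * PySem.List.pyGetD q (k - i) 0) := by
    apply List.map_congr_left
    intro i hi
    rw [PySem.List.mem_pyRange_one] at hi
    exact if_pos (by omega)
  rw [h1, PySem.List.pyRange_one, List.map_map,
    show ((k + 1 : Int) - 0).toNat = k.toNat + 1 from by omega, pvListSumRange]
  simp only [pvC, if_pos hk0]
  rw [PowerSeries.coeff_mul, Finset.Nat.sum_antidiagonal_eq_sum_range_succ_mk]
  apply Finset.sum_congr rfl
  intro t ht
  rw [Finset.mem_range] at ht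
  simp only [Function.comp_apply, zero_add]
  rw [hp.2 (t : Int) (by omega) (by omega), hq.2 (k - (t : Int)) (by omega) (by omega)]
  simp only [pvC, if_pos (show (0 : Int) ≤ (t : Int) by omega),
    if_pos (show (0 : Int) ≤ k - (t : Int) by omega)]
  rw [show ((t : Int)).toNat = t from by omega,
    show (k - (t : Int)).toNat = k.toNat - t from by omega]

theorem pvFoldConstFun (l : List Int) (f : List Int → List Int) (a : List Int) :
    l.foldl (fun d _ => f d) a = f^[l.length] a := by
  induction l generalizing a with
  | nil => simp
  | cons x l ih =>
    rw [List.foldl_cons, ih, List.length_cons, Function.iterate_succ_apply]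

theorem pvIter_agree (N n : Int) (hn : 1 ≤ n) :
    ∀ (m : Nat) (a : List Int) (φ : PowerSeries ℤ), pvAgree N a φ →
      pvAgree N ((fun d => pvInner N n d)^[m] a) (φ * pvG n.toNat ^ m) := by
  intro m
  induction m with
  | zero => intro a φ ha; simpa using ha
  | succ m ih =>
    intro a φ ha
    rw [Function.iterate_succ_apply,
      show φ * pvG n.toNat ^ (m + 1) = φ * pvG n.toNat * pvG n.toNat ^ m from by ring]
    exact ih (pvInner N n a) (φ * pvG n.toNat) (pvInner_agree N n hn a φ ha)

theorem pvKnapFold_agree (N : Int) :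
    ∀ (l : List Int) (a : List Int) (φ : PowerSeries ℤ), (∀ n ∈ l, 1 ≤ n) → pvAgree N a φ →
      pvAgree N
        (l.foldl
          (fun dp n =>
            (PySem.List.pyRange 0 (1 + (if 3 ≤ n then 1 else 0) + (if 4 ≤ n then 1 else 0)) 1).foldl
              (fun dp _ => pvInner N n dp) dp) a)
        (φ * (l.map fun n =>
              pvG n.toNat ^ ((1 : Int) + (if 3 ≤ n then 1 else 0) + (if 4 ≤ n then 1 else 0)).toNat).prod) := by
  intro l
  induction l with
  | nil => intro a φ _ ha; simpa using ha
  | cons n l ih =>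
    intro a φ hl ha
    simp only [List.foldl_cons, List.map_cons, List.prod_cons]
    rw [pvFoldConstFun, PySem.List.length_pyRange_one, sub_zero, ← mul_assoc]
    exact ih _ _ (fun x hx => hl x (List.mem_cons_of_mem _ hx))
      (pvIter_agree N n (hl n (by simp)) _ a φ ha)

theorem pvProd_eq_aux (N : Int) (hN : 1 ≤ N) :
    ((PySem.List.pyRange 2 (N + 1) 1).map fun n => pvG n.toNat).prod
      * ((PySem.List.pyRange 3 (N + 1) 1).map fun n => pvG n.toNat).prod
      * ((PySem.List.pyRange 4 (N + 1) 1).map fun n => pvG n.toNat).prod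
    = ((PySem.List.pyRange 2 (N + 1) 1).map fun n =>
        pvG n.toNat ^ ((1 : Int) + (if 3 ≤ n then 1 else 0) + (if 4 ≤ n then 1 else 0)).toNat).prod := by
  induction N, hN using Int.le_induction with
  | base =>
    rw [PySem.List.pyRange_one_eq_nil (show (1:Int) + 1 ≤ 2 by norm_num),
      PySem.List.pyRange_one_eq_nil (show (1:Int) + 1 ≤ 3 by norm_num),
      PySem.List.pyRange_one_eq_nil (show (1:Int) + 1 ≤ 4 by norm_num)]
    simp
  | succ N hN ih =>
    by_cases h3 : 3 ≤ N + 1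
    · by_cases h4 : 4 ≤ N + 1
      · -- N + 1 ≥ 4: every range gains the element N + 1
        rw [PySem.List.pyRange_one_succ_right (show (2:Int) ≤ N + 1 by omega),
          PySem.List.pyRange_one_succ_right (show (3:Int) ≤ N + 1 by omega),
          PySem.List.pyRange_one_succ_right (show (4:Int) ≤ N + 1 by omega)]
        simp only [List.map_append, List.prod_append, List.map_singleton, List.prod_singleton]
        rw [if_pos h3, if_pos h4, show ((1 : Int) + 1 + 1).toNat = 3 from rfl, ← ih]
        ring
      · -- N + 1 = 3
        have hN2 : N = 2 := by omega
        subst hN2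
        have e2 : PySem.List.pyRange 2 (2 + 1 + 1) 1 = [2, 3] := by decide
        have e3 : PySem.List.pyRange 3 (2 + 1 + 1) 1 = [3] := by decide
        have e4 : PySem.List.pyRange 4 (2 + 1 + 1) 1 = ([] : List Int) := by decide
        rw [e2, e3, e4]
        norm_num
        rw [show Int.toNat 2 = 2 from rfl]
        ring
    · -- N + 1 = 2
      have hN1 : N = 1 := by omega
      subst hN1
      have e2 : PySem.List.pyRange 2 (1 + 1 + 1) 1 = [2] := by decide
      have e3 : PySem.List.pyRange 3 (1 + 1 + 1) 1 = ([] : List Int) := by decide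
      have e4 : PySem.List.pyRange 4 (1 + 1 + 1) 1 = ([] : List Int) := by decide
      rw [e2, e3, e4]
      norm_num

theorem pvProd_eq (N : Int) :
    ((PySem.List.pyRange 2 (N + 1) 1).map fun n => pvG n.toNat).prod
      * ((PySem.List.pyRange 3 (N + 1) 1).map fun n => pvG n.toNat).prod
      * ((PySem.List.pyRange 4 (N + 1) 1).map fun n => pvG n.toNat).prod
    = ((PySem.List.pyRange 2 (N + 1) 1).map fun n =>
        pvG n.toNat ^ ((1 : Int) + (if 3 ≤ n then 1 else 0) + (if 4 ≤ n then 1 else 0)).toNat).prod := by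
  by_cases hN : N ≤ 1
  · rw [PySem.List.pyRange_one_eq_nil (show N + 1 ≤ 2 by omega),
      PySem.List.pyRange_one_eq_nil (show N + 1 ≤ 3 by omega),
      PySem.List.pyRange_one_eq_nil (show N + 1 ≤ 4 by omega)]
    simp
  · exact pvProd_eq_aux N (by omega)

-- ===== VERDICT (by name: the statement is the Claim_ definition above) =====
theorem w4_vacuum_dims_spec : Claim_equal_w4_vacuum_dims := by
  intro mw hDom hPre
  unfold Spec_w4_vacuum_dims
  unfold Pre_w4_vacuum_dims at hPre
  simp only [w4_vacuum_dims, w4_vacuum_dims_alt]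
  apply List.map_congr_left
  intro h hmem
  rw [PySem.List.mem_pyRange_one] at hmem
  have hA : pvAgree mw
      (pvConvLoop mw (pvConvLoop mw (pvPartsDP mw 2) (pvPartsDP mw 3)) (pvPartsDP mw 4))
      (((PySem.List.pyRange 2 (mw + 1) 1).map fun n => pvG n.toNat).prod
        * ((PySem.List.pyRange 3 (mw + 1) 1).map fun n => pvG n.toNat).prod
        * ((PySem.List.pyRange 4 (mw + 1) 1).map fun n => pvG n.toNat).prod) :=
    pvConvLoop_agree mw _ _ _ _
      (pvConvLoop_agree mw _ _ _ _ (pvPartsDP_agree mw 2 (by norm_num) hPre)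
        (pvPartsDP_agree mw 3 (by norm_num) hPre))
      (pvPartsDP_agree mw 4 (by norm_num) hPre)
  have hB : pvAgree mw (pvKnapsack mw)
      (((PySem.List.pyRange 2 (mw + 1) 1).map fun n =>
          pvG n.toNat ^ ((1 : Int) + (if 3 ≤ n then 1 else 0) + (if 4 ≤ n then 1 else 0)).toNat).prod) := by
    unfold pvKnapsack
    have h := pvKnapFold_agree mw (PySem.List.pyRange 2 (mw + 1) 1)
      (1 :: List.replicate mw.toNat 0) 1
      (fun n hn => by rw [PySem.List.mem_pyRange_one] at hn; omega) (pvAgree_init_B mw hPre)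
    simpa using h
  have hval : PySem.List.pyGetD
        (pvConvLoop mw (pvConvLoop mw (pvPartsDP mw 2) (pvPartsDP mw 3)) (pvPartsDP mw 4)) h 0
      = PySem.List.pyGetD (pvKnapsack mw) h 0 := by
    rw [hA.2 h (by omega) (by omega), hB.2 h (by omega) (by omega), pvProd_eq mw]
  exact congrArg (fun z => (h, z)) hval

@[simp]
theorem w4_vacuum_dims_raises : Claim_raises_w4_vacuum_dims := by
  unfold Claim_raises_w4_vacuum_dims
  constructor
  · intro mw _ hr hp
    unfold Raises_w4_vacuum_dims at hr
    unfold Pre_w4_vacuum_dims at hp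
    omega
  · refine ⟨by decide, by decide, by decide⟩
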